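-- pv_equiv track=rewrite | github.com/kariinass/dictionary | dictionary.py | add_brackets
-- ===== SOURCE A (Python) =====
-- def add_brackets(word):
--     length = len(word)
--     mid = length // 2
--
--     result = []
--     if length % 2 == 0:
--         mid = length // 2
--         for i in range(length):
--             if i == mid or i == mid-1:
--                 result.append(word[i])
--
--             else:
--                 if i < mid and i != mid-1:
--                     result.append(word[i]+'(')
--                 elif i > mid:
--                     result.append(')' + word[i])
--
--
--     else:
--         mid = length // 2
--         for i in range(length):
--             if i == mid:
--                 result.append(word[i])
--             else:
--                 if i < mid:
--                     result.append(word[i] + '(')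
--                 elif i > mid:
--                     result.append(')' + word[i])
--
--     return ''.join(result)
-- ===== SOURCE B (Python) =====
-- def add_brackets(word):
--     n = len(word)
--     p = (n - 1) // 2 if n else 0
--     opening = ''.join(c + '(' for c in word[:p])
--     closing = ''.join(')' + c for c in word[n - p:])
--     return opening + word[p:n - p] + closing
-- ===== Notes on version B (the rewrite author's own statement) =====
-- stated objective: simpler
-- what changed: Replaced the index loop with even/odd mid-comparison branches by the closed form: p = (n-1)//2 bracket pairs built from three slices (each of the first p chars followed by an opening bracket, the middle slice unchanged, each of the last p chars preceded by a closing bracket), eliminating the parity split and all per-index tests.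
import Mathlib
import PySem

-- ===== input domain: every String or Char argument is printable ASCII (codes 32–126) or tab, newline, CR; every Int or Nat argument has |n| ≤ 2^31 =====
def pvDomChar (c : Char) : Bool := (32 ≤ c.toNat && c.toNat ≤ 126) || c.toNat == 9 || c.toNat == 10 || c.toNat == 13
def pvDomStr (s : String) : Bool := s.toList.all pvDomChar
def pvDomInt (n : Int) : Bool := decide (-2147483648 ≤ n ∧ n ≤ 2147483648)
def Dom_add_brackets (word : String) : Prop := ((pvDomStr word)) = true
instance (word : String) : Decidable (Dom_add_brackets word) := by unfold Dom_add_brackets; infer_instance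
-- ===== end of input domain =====

-- B replaces A's index loop with even/odd mid branches by the closed form: with
-- p = (n-1)//2, join '(' after each of the first p chars, keep the middle slice, and
-- put ')' before each of the last p chars (objective: simpler; no parity split, no index tests).

-- ===== PORT A =====
-- Faithful transliteration of A: length, mid = length // 2, an even branch and an odd
-- branch, each a loop over range(length) appending string pieces (pieces kept as
-- List Char), finally ''.join(result).
def add_brackets (word : String) : String :=
  let l := word.toList
  let length : Int := l.length
  let mid : Int := PySem.Int.floordiv length 2
  let result : List (List Char) :=
    if PySem.Int.mod length 2 = 0 then
      (PySem.List.pyRange 0 length 1).foldl (fun r i =>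
        if i = mid ∨ i = mid - 1 then r ++ [[PySem.List.pyGetD l i ' ']]
        else if i < mid ∧ i ≠ mid - 1 then r ++ [[PySem.List.pyGetD l i ' ', '(']]
        else if i > mid then r ++ [[')', PySem.List.pyGetD l i ' ']]
        else r) []
    else
      (PySem.List.pyRange 0 length 1).foldl (fun r i =>
        if i = mid then r ++ [[PySem.List.pyGetD l i ' ']]
        else if i < mid then r ++ [[PySem.List.pyGetD l i ' ', '(']]
        else if i > mid then r ++ [[')', PySem.List.pyGetD l i ' ']]
        else r) []
  String.ofList result.flatten

-- ===== PORT B =====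
-- Transliteration of Source B: n = len(word); p = (n-1)//2 if n else 0;
-- ''.join(c+'(' for c in word[:p]) + word[p:n-p] + ''.join(')'+c for c in word[n-p:]).
def add_brackets_alt (word : String) : String :=
  let l := word.toList
  let n : Int := l.length
  let p : Int := if n ≠ 0 then PySem.Int.floordiv (n - 1) 2 else 0
  let opening := (PySem.List.slice l none (some p)).flatMap (fun c => [c, '('])
  let closing := (PySem.List.slice l (some (n - p)) none).flatMap (fun c => [')', c])
  String.ofList (opening ++ PySem.List.slice l (some p) (some (n - p)) ++ closing)

-- ===== PRECONDITION & SPEC =====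
def Spec_add_brackets (word : String) (out : String) : Prop := out = add_brackets_alt word
instance (word : String) (out : String) : Decidable (Spec_add_brackets word out) := by unfold Spec_add_brackets; infer_instance

-- ===== CLAIM (what is proved, stated in full; the proofs are below) =====
def Claim_equal_add_brackets : Prop := ∀ (word : String), Dom_add_brackets word → Spec_add_brackets word (add_brackets word)

-- ===== LEMMAS AND PROOFS =====

-- Closed form both programs are reduced to: with p = (n-1)/2 pairs of brackets,
-- the first p chars each followed by '(', the middle n-2p chars plain, the last p
-- chars each preceded by ')'.
def nest (l : List Char) : List Char :=
  let n := l.length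
  let p := (n - 1) / 2
  (l.take p).flatMap (fun c => [c, '('])
    ++ (l.drop p).take (n - 2 * p)
    ++ (l.drop (n - p)).flatMap (fun c => [')', c])

-- uniform per-index piece of A's loop
def pieceA (l : List Char) (i : Nat) : List Char :=
  let n := l.length
  let p := (n - 1) / 2
  if i < p then [l.getD i ' ', '(']
  else if i < n - p then [l.getD i ' ']
  else [')', l.getD i ' ']

lemma flatMap_range' (l : List Char) (g : Char → List Char) :
    ∀ (m j : Nat), j + m ≤ l.length →
      (List.range' j m).flatMap (fun i => g (l.getD i ' ')) = ((l.drop j).take m).flatMap g := by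
  intro m
  induction m with
  | zero => simp
  | succ m ih =>
    intro j h
    have hj : j < l.length := by omega
    rw [List.range'_succ, List.drop_eq_getElem_cons hj]
    simp only [List.flatMap_cons, List.take_succ_cons, ih (j + 1) (by omega)]
    congr 2
    exact List.getD_eq_getElem l ' ' hj

lemma range_split (n p : Nat) (h : 2 * p ≤ n) :
    List.range n = List.range' 0 p ++ List.range' p (n - 2 * p) ++ List.range' (n - p) p := by
  have h2 : List.range' p (n - 2 * p) 1 ++ List.range' (n - p) p 1 = List.range' p ((n - 2 * p) + p) 1 := by
    have := List.range'_append (s := p) (m := n - 2 * p) (n := p) (step := 1)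
    rw [(by omega : p + 1 * (n - 2 * p) = n - p)] at this
    exact this
  have h1 : List.range' 0 p 1 ++ List.range' p ((n - 2 * p) + p) 1 = List.range' 0 (p + ((n - 2 * p) + p)) 1 := by
    have := List.range'_append (s := 0) (m := p) (n := (n - 2 * p) + p) (step := 1)
    simpa using this
  rw [List.append_assoc, h2, h1, List.range_eq_range']
  congr 1
  omega

lemma flatten_map_pieceA (l : List Char) :
    ((List.range l.length).map (pieceA l)).flatten = nest l := by
  set n := l.length with hn
  set p := (n - 1) / 2 with hp
  rw [range_split n p (by omega)]
  simp only [List.map_append, List.flatten_append]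
  have e1 : (List.range' 0 p).map (pieceA l) = (List.range' 0 p).map (fun i => [l.getD i ' ', '(']) := by
    apply List.map_congr_left
    intro i hi
    have : i < p := by
      have := List.mem_range'_1.mp hi; omega
    simp [pieceA, ← hn, ← hp, this]
  have e2 : (List.range' p (n - 2 * p)).map (pieceA l) = (List.range' p (n - 2 * p)).map (fun i => [l.getD i ' ']) := by
    apply List.map_congr_left
    intro i hi
    have h2 := List.mem_range'_1.mp hi
    have h3 : ¬ i < p := by omega
    have h4 : i < n - p := by omega
    simp [pieceA, ← hn, ← hp, h3, h4]
  have e3 : (List.range' (n - p) p).map (pieceA l) = (List.range' (n - p) p).map (fun i => [')', l.getD i ' ']) := by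
    apply List.map_congr_left
    intro i hi
    have h2 := List.mem_range'_1.mp hi
    have h3 : ¬ i < p := by omega
    have h4 : ¬ i < n - p := by omega
    simp [pieceA, ← hn, ← hp, h3, h4]
  rw [e1, e2, e3]
  rw [← List.flatMap_def, ← List.flatMap_def, ← List.flatMap_def]
  rw [flatMap_range' l (fun c => [c, '(']) p 0 (by omega)]
  rw [flatMap_range' l (fun c => [c]) (n - 2 * p) p (by omega)]
  rw [flatMap_range' l (fun c => [')', c]) p (n - p) (by omega)]
  unfold nest
  simp only [← hn, ← hp, List.drop_zero, List.flatMap_singleton']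
  congr 2
  exact List.take_of_length_le (by simp [← hn]; omega)

-- A's loop (even or odd branch) equals the map of the uniform piece
lemma aSide (l : List Char) :
    add_brackets (String.ofList l) = String.ofList (nest l) := by
  unfold add_brackets
  simp only [String.toList_ofList]
  set n := l.length with hn
  have hcast := PySem.List.pyRange_zero_natCast n
  have hmid : PySem.Int.floordiv (↑n) 2 = ((n / 2 : Nat) : Int) := PySem.Int.floordiv_natCast n 2
  have hmod : PySem.Int.mod (↑n) 2 = ((n % 2 : Nat) : Int) := PySem.Int.mod_natCast n 2
  rw [← flatten_map_pieceA]
  congr 1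
  simp only [hcast, hmid, hmod, List.foldl_map]
  set p := (n - 1) / 2 with hp
  by_cases hpar : (n % 2 : Nat) = 0
  · rw [if_pos (by exact_mod_cast congrArg (Nat.cast : Nat → Int) hpar)]
    rw [PySem.List.foldl_congr_mem _ _ (fun r (i : Nat) => r ++ [pieceA l i]) []]
    · rw [PySem.List.foldl_append_singleton_eq_map, hn]
      simp
    · intro acc i hi
      have hin : i < n := List.mem_range.mp hi
      have hget : PySem.List.pyGetD l (↑i) ' ' = l.getD i ' ' := PySem.List.pyGetD_natCast l i ' '
      simp only [hget, pieceA, ← hn, ← hp]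
      by_cases h1 : (i : Int) = ((n / 2 : Nat) : Int) ∨ (i : Int) = ((n / 2 : Nat) : Int) - 1
      · rw [if_pos h1]
        have : ¬ i < p ∧ i < n - p := by
          rcases h1 with h | h <;> [skip; skip] <;>
            · have : i = n / 2 ∨ (i : Int) = ((n / 2 : Nat) : Int) - 1 := by omega
              omega
        rw [if_neg (by omega : ¬ i < p), if_pos this.2]
      · rw [if_neg h1]
        rw [not_or] at h1
        by_cases h2 : (i : Int) < ((n / 2 : Nat) : Int) ∧ (i : Int) ≠ ((n / 2 : Nat) : Int) - 1
        · rw [if_pos h2]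
          have : i < p := by omega
          rw [if_pos this]
        · rw [if_neg h2]
          have h3 : (i : Int) > ((n / 2 : Nat) : Int) := by omega
          rw [if_pos h3]
          rw [if_neg (by omega : ¬ i < p), if_neg (by omega : ¬ i < n - p)]
  · rw [if_neg (by exact_mod_cast fun h => hpar (by exact_mod_cast h))]
    rw [PySem.List.foldl_congr_mem _ _ (fun r (i : Nat) => r ++ [pieceA l i]) []]
    · rw [PySem.List.foldl_append_singleton_eq_map, hn]
      simp
    · intro acc i hi
      have hin : i < n := List.mem_range.mp hi
      have hget : PySem.List.pyGetD l (↑i) ' ' = l.getD i ' ' := PySem.List.pyGetD_natCast l i ' '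
      simp only [hget, pieceA, ← hn, ← hp]
      by_cases h1 : (i : Int) = ((n / 2 : Nat) : Int)
      · rw [if_pos h1]
        rw [if_neg (by omega : ¬ i < p), if_pos (by omega : i < n - p)]
      · rw [if_neg h1]
        by_cases h2 : (i : Int) < ((n / 2 : Nat) : Int)
        · rw [if_pos h2, if_pos (by omega : i < p)]
        · rw [if_neg h2, if_pos (by omega : (i : Int) > ((n / 2 : Nat) : Int))]
          rw [if_neg (by omega : ¬ i < p), if_neg (by omega : ¬ i < n - p)]

-- B's slice expression equals the closed form
lemma bSide (l : List Char) : add_brackets_alt (String.ofList l) = String.ofList (nest l) := by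
  simp only [add_brackets_alt, String.toList_ofList]
  congr 1
  by_cases h0 : l.length = 0
  · have hnil : l = [] := List.length_eq_zero_iff.mp h0
    subst hnil
    simp [nest, PySem.List.slice]
  · have hn : ((l.length : Int)) ≠ 0 := by exact_mod_cast h0
    rw [if_pos hn]
    have hp1 : ((l.length : Int) - 1) = ((l.length - 1 : Nat) : Int) := by
      have : 1 ≤ l.length := by omega
      push_cast [this]
      ring
    have hfd : PySem.Int.floordiv ((l.length - 1 : Nat) : Int) 2 = (((l.length - 1) / 2 : Nat) : Int) := by
      exact_mod_cast PySem.Int.floordiv_natCast (l.length - 1) 2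
    rw [hp1, hfd]
    have hnp : ((l.length : Int) - ((l.length - 1) / 2 : Nat)) = ((l.length - (l.length - 1) / 2 : Nat) : Int) := by
      have : (l.length - 1) / 2 ≤ l.length := by omega
      push_cast [this]
      ring
    rw [hnp, PySem.List.slice_to_natCast, PySem.List.slice_from_natCast, PySem.List.slice_natCast]
    simp only [nest]
    have e : l.length - (l.length - 1) / 2 - (l.length - 1) / 2 = l.length - 2 * ((l.length - 1) / 2) := by
      omega
    rw [e]

-- ===== VERDICT (by name: the statement is the Claim_ definition above) =====
theorem add_brackets_spec : Claim_equal_add_brackets := by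
  intro word _
  unfold Spec_add_brackets
  have hA := aSide word.toList
  have hB := bSide word.toList
  rw [String.ofList_toList] at hA hB
  rw [hA, hB]
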